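-- pv_equiv track=rewrite | github.com/adrienbricchi/auto-mkv | main/merge.py | parse_mkvinfo_result
-- ===== SOURCE A (Python) =====
-- import itertools
--
-- def parse_mkvinfo_result(lines):
--     """Get an answer."""
--     lines = list(itertools.dropwhile(lambda line: line != "|+ Tracks", lines))[1:]
--     tracks = [list(group) for key, group in itertools.groupby(lines, lambda line: line == "| + Track") if not key]
--     result = []
--     for track in tracks:
--         language_info = [info for info in track if info.startswith("|  + Language: ")] + ["|  + Language: eng"]
--         language = language_info[0][15:]
--         codec_info = [info for info in track if info.startswith("|  + Codec ID: ")] + ["|  + Track type: eng"]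
--         codec = codec_info[0][17:].lower()
--         result += [(codec, language)]
--     return result
-- ===== SOURCE B (Python) =====
-- def parse_mkvinfo_result(lines):
--     """Get an answer."""
--     it = iter(lines)
--     for line in it:
--         if line == "|+ Tracks":
--             break
--     else:
--         return []
--     result = []
--     language = None
--     codec = None
--     in_track = False
--     for line in it:
--         if line == "| + Track":
--             if in_track:
--                 result.append((codec if codec is not None else "eng",
--                                language if language is not None else "eng"))
--             language = None
--             codec = None
--             in_track = False
--         else:
--             in_track = True
--             if language is None and line.startswith("|  + Language: "):
--                 language = line[15:]
--             if codec is None and line.startswith("|  + Codec ID: "):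
--                 codec = line[17:].lower()
--     if in_track:
--         result.append((codec if codec is not None else "eng",
--                        language if language is not None else "eng"))
--     return result
-- ===== Notes on version B (the rewrite author's own statement) =====
-- stated objective: simpler
-- what changed: Replaced the dropwhile+groupby pipeline with per-track filter scans by a single pass over the lines that maintains first-match language/codec state and emits a track at each '| + Track' boundary.
import Mathlib
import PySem

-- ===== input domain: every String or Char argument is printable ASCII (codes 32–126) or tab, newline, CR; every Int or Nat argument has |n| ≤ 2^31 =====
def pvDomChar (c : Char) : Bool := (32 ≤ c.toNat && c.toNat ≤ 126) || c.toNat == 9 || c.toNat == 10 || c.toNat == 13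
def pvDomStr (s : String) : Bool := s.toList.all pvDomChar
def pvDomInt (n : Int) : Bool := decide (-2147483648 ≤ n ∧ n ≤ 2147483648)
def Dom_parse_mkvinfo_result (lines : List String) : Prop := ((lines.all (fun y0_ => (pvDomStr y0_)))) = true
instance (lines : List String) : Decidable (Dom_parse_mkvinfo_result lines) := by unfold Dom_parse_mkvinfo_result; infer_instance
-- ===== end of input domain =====

-- B replaces A's dropwhile+groupby+per-track filter passes by one single-pass state machine; objective: simpler.

-- ===== PORT A =====
-- itertools.groupby with key (line == "| + Track"), transliterated: consecutive lines with
-- equal key are merged into one (key, group) run.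
def pvGroupByTrack : List String → List (Bool × List String)
  | [] => []
  | x :: xs =>
    let k := x == "| + Track"
    match pvGroupByTrack xs with
    | (k', g) :: rest => if k' == k then (k, x :: g) :: rest else (k, [x]) :: (k', g) :: rest
    | [] => [(k, [x])]

-- the body of A's 'for track in tracks' loop (the (codec, language) it appends)
def pvTrackInfo (track : List String) : String × String :=
  let language_info := track.filter (fun info => PySem.Str.startswith info "|  + Language: ") ++ ["|  + Language: eng"]
  -- language_info[0]: the list is nonempty (a default was appended), so pyGet? is some
  let language := PySem.Str.slice ((PySem.List.pyGet? language_info 0).getD "") (some 15) none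
  let codec_info := track.filter (fun info => PySem.Str.startswith info "|  + Codec ID: ") ++ ["|  + Track type: eng"]
  let codec := PySem.Str.lower (PySem.Str.slice ((PySem.List.pyGet? codec_info 0).getD "") (some 17) none)
  (codec, language)

def parse_mkvinfo_result (lines : List String) : List (String × String) :=
  let lines := PySem.List.slice (lines.dropWhile (fun line => !(line == "|+ Tracks"))) (some 1) none
  let tracks := (pvGroupByTrack lines).filterMap (fun kg => if kg.1 then none else some kg.2)
  tracks.foldl (fun result track => result ++ [pvTrackInfo track]) []

-- ===== PORT B =====
-- B's first loop: advance the iterator past the "|+ Tracks" marker (none = for/else: return [])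
def pvAltSkip : List String → Option (List String)
  | [] => none
  | l :: ls => if l == "|+ Tracks" then some ls else pvAltSkip ls

-- B's loop state: (result, language, codec, in_track)
def pvAltStep (st : List (String × String) × Option String × Option String × Bool)
    (line : String) : List (String × String) × Option String × Option String × Bool :=
  let (result, language, codec, in_track) := st
  if line == "| + Track" then
    (if in_track then result ++ [(codec.getD "eng", language.getD "eng")] else result,
     none, none, false)
  else
    let language := if language.isNone && PySem.Str.startswith line "|  + Language: "
      then some (PySem.Str.slice line (some 15) none) else language
    let codec := if codec.isNone && PySem.Str.startswith line "|  + Codec ID: "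
      then some (PySem.Str.lower (PySem.Str.slice line (some 17) none)) else codec
    (result, language, codec, true)

def parse_mkvinfo_result_alt (lines : List String) : List (String × String) :=
  match pvAltSkip lines with
  | none => []
  | some rest =>
    let st := rest.foldl pvAltStep ([], none, none, false)
    if st.2.2.2 then st.1 ++ [(st.2.2.1.getD "eng", st.2.1.getD "eng")] else st.1

-- ===== PRECONDITION & SPEC =====
def Spec_parse_mkvinfo_result (lines : List String) (out : List (String × String)) : Prop := out = parse_mkvinfo_result_alt lines
instance (lines : List String) (out : List (String × String)) : Decidable (Spec_parse_mkvinfo_result lines out) := by unfold Spec_parse_mkvinfo_result; infer_instance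

-- ===== CLAIM (what is proved, stated in full; the proofs are below) =====
def Claim_equal_parse_mkvinfo_result : Prop := ∀ (lines : List String), Dom_parse_mkvinfo_result lines → Spec_parse_mkvinfo_result lines (parse_mkvinfo_result lines)

-- ===== LEMMAS AND PROOFS =====

-- first Language/Codec line of a group, as B's state records them
def pvOptLang (t : List String) : Option String :=
  (t.filter (fun s => PySem.Str.startswith s "|  + Language: ")).head?.map
    (fun s => PySem.Str.slice s (some 15) none)

def pvOptCodec (t : List String) : Option String :=
  (t.filter (fun s => PySem.Str.startswith s "|  + Codec ID: ")).head?.map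
    (fun s => PySem.Str.lower (PySem.Str.slice s (some 17) none))

def pvEmit (c l : Option String) : String × String := (c.getD "eng", l.getD "eng")

-- left-to-right specification of the non-key groups, with a pending partial group p
def pvGroups : List String → List String → List (List String)
  | p, [] => if p = [] then [] else [p]
  | p, l :: ls =>
    if l == "| + Track" then (if p = [] then pvGroups [] ls else p :: pvGroups [] ls)
    else pvGroups (p ++ [l]) ls

def pvNonKey (gs : List (Bool × List String)) : List (List String) :=
  gs.filterMap (fun kg => if kg.1 then none else some kg.2)

theorem pvGroupByTrack_cons (x : String) (xs : List String) :
    pvGroupByTrack (x :: xs) =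
      (match pvGroupByTrack xs with
        | (k', g) :: rest =>
          if k' == (x == "| + Track") then ((x == "| + Track"), x :: g) :: rest
          else ((x == "| + Track"), [x]) :: (k', g) :: rest
        | [] => [((x == "| + Track"), [x])]) := rfl

theorem pvTrackInfo_eq (t : List String) : pvTrackInfo t = pvEmit (pvOptCodec t) (pvOptLang t) := by
  unfold pvTrackInfo pvEmit pvOptCodec pvOptLang
  rcases t.filter (fun s => PySem.Str.startswith s "|  + Language: ") with _ | ⟨x, xs⟩ <;>
  rcases t.filter (fun s => PySem.Str.startswith s "|  + Codec ID: ") with _ | ⟨y, ys⟩ <;>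
    simp only [List.nil_append, List.cons_append, PySem.List.pyGet?_zero_cons, Option.getD_some,
      List.head?_nil, List.head?_cons, Option.map_none, Option.map_some, Option.getD_none,
      Option.getD_some, Prod.mk.injEq] <;>
    refine ⟨?_, ?_⟩ <;> first | rfl | decide

-- groupby agrees with the left-to-right grouping
theorem pvGroupBy_spec (ls : List String) :
    pvNonKey (pvGroupByTrack ls) = pvGroups [] ls ∧
    ∀ p, p ≠ [] →
      pvGroups p ls = (match pvGroupByTrack ls with
        | (false, g) :: rest => (p ++ g) :: pvNonKey rest
        | _ => p :: pvNonKey (pvGroupByTrack ls)) := by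
  induction ls with
  | nil => exact ⟨rfl, fun p hp => by simp [pvGroups, pvGroupByTrack, pvNonKey, hp]⟩
  | cons l ls ih =>
    obtain ⟨ih1, ih2⟩ := ih
    by_cases hl : l = "| + Track"
    · have drop : pvNonKey (pvGroupByTrack (l :: ls)) = pvNonKey (pvGroupByTrack ls) := by
        rw [pvGroupByTrack_cons]
        rcases hg : pvGroupByTrack ls with _ | ⟨⟨_ | _, g⟩, rest⟩ <;> simp [hg, hl, pvNonKey]
      constructor
      · rw [drop, ih1]; simp [pvGroups, hl]
      · intro p hp
        rw [show pvGroups p (l :: ls) = p :: pvGroups [] ls by simp [pvGroups, hl, hp], ← ih1, ← drop]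
        rw [pvGroupByTrack_cons]
        rcases hg : pvGroupByTrack ls with _ | ⟨⟨_ | _, g⟩, rest⟩ <;> simp [hg, hl, pvNonKey]
    · have key : (l == "| + Track") = false := by simp [hl]
      have main : ∀ p, pvGroups (p ++ [l]) ls = (match pvGroupByTrack (l :: ls) with
          | (false, g) :: rest => (p ++ g) :: pvNonKey rest
          | _ => p :: pvNonKey (pvGroupByTrack (l :: ls))) := by
        intro p
        rw [ih2 (p ++ [l]) (by simp), pvGroupByTrack_cons]
        rcases hg : pvGroupByTrack ls with _ | ⟨⟨_ | _, g⟩, rest⟩ <;> simp [hg, key, pvNonKey]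
      constructor
      · rw [show pvGroups [] (l :: ls) = pvGroups ([] ++ [l]) ls by simp [pvGroups, key], main [],
          pvGroupByTrack_cons]
        rcases hg : pvGroupByTrack ls with _ | ⟨⟨_ | _, g⟩, rest⟩ <;> simp [hg, key, pvNonKey]
      · intro p _
        rw [show pvGroups p (l :: ls) = pvGroups (p ++ [l]) ls by simp [pvGroups, key], main p]

theorem pvOptLang_append (p : List String) (l : String) :
    pvOptLang (p ++ [l]) =
      (if (pvOptLang p).isNone && PySem.Str.startswith l "|  + Language: "
        then some (PySem.Str.slice l (some 15) none) else pvOptLang p) := by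
  unfold pvOptLang
  rw [List.filter_append]
  rcases hp : p.filter (fun s => PySem.Str.startswith s "|  + Language: ") with _ | ⟨x, xs⟩ <;>
    by_cases hs : PySem.Str.startswith l "|  + Language: " <;> simp [hs]

theorem pvOptCodec_append (p : List String) (l : String) :
    pvOptCodec (p ++ [l]) =
      (if (pvOptCodec p).isNone && PySem.Str.startswith l "|  + Codec ID: "
        then some (PySem.Str.lower (PySem.Str.slice l (some 17) none)) else pvOptCodec p) := by
  unfold pvOptCodec
  rw [List.filter_append]
  rcases hp : p.filter (fun s => PySem.Str.startswith s "|  + Codec ID: ") with _ | ⟨x, xs⟩ <;>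
    by_cases hs : PySem.Str.startswith l "|  + Codec ID: " <;> simp [hs]

def pvFinalize (st : List (String × String) × Option String × Option String × Bool) :
    List (String × String) :=
  if st.2.2.2 then st.1 ++ [(st.2.2.1.getD "eng", st.2.1.getD "eng")] else st.1

theorem pvFoldB (ls : List String) : ∀ (res : List (String × String)) (p : List String),
    pvFinalize (ls.foldl pvAltStep (res, pvOptLang p, pvOptCodec p, !p.isEmpty)) =
      res ++ (pvGroups p ls).map (fun t => pvEmit (pvOptCodec t) (pvOptLang t)) := by
  induction ls with
  | nil =>
    intro res p
    cases p with
    | nil => simp [pvFinalize, pvGroups, pvOptLang, pvOptCodec]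
    | cons x xs => simp [pvFinalize, pvGroups, pvEmit]
  | cons l ls ih =>
    intro res p
    by_cases hl : l = "| + Track"
    · have step : pvAltStep (res, pvOptLang p, pvOptCodec p, !p.isEmpty) l =
          ((if !p.isEmpty then res ++ [pvEmit (pvOptCodec p) (pvOptLang p)] else res),
            none, none, false) := by
        simp [pvAltStep, hl, pvEmit]
      have ih0 := ih (if !p.isEmpty then res ++ [pvEmit (pvOptCodec p) (pvOptLang p)] else res) []
      simp only [List.foldl_cons, step]
      rw [show ((if !p.isEmpty then res ++ [pvEmit (pvOptCodec p) (pvOptLang p)] else res),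
          (none : Option String), (none : Option String), false) =
          ((if !p.isEmpty then res ++ [pvEmit (pvOptCodec p) (pvOptLang p)] else res),
          pvOptLang [], pvOptCodec [], !(List.isEmpty ([] : List String))) from rfl, ih0]
      cases p with
      | nil => simp [pvGroups, hl]
      | cons x xs => simp [pvGroups, hl]
    · have key : (l == "| + Track") = false := by simp [hl]
      have step : pvAltStep (res, pvOptLang p, pvOptCodec p, !p.isEmpty) l =
          (res, pvOptLang (p ++ [l]), pvOptCodec (p ++ [l]), true) := by
        simp only [pvAltStep, key, Bool.false_eq_true, if_false]
        rw [pvOptLang_append, pvOptCodec_append]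
      simp only [List.foldl_cons, step]
      have ihp := ih res (p ++ [l])
      rw [show (!(p ++ [l]).isEmpty) = true by simp] at ihp
      rw [ihp]
      simp [pvGroups, key]

theorem pvAltSkip_eq (ls : List String) :
    pvAltSkip ls = (match ls.dropWhile (fun l => !(l == "|+ Tracks")) with
      | [] => none
      | _ :: rest => some rest) := by
  induction ls with
  | nil => rfl
  | cons l ls ih =>
    by_cases hl : l = "|+ Tracks"
    · simp [pvAltSkip, hl, List.dropWhile]
    · have : (l == "|+ Tracks") = false := by simp [hl]
      simp [pvAltSkip, this, List.dropWhile, ih]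

theorem pvFoldA (ts : List (List String)) : ∀ (res : List (String × String)),
    ts.foldl (fun result track => result ++ [pvTrackInfo track]) res = res ++ ts.map pvTrackInfo := by
  induction ts with
  | nil => simp
  | cons t ts ih => intro res; simp [ih]

-- ===== VERDICT (by name: the statement is the Claim_ definition above) =====
theorem parse_mkvinfo_result_spec : Claim_equal_parse_mkvinfo_result := by
  intro lines _
  show parse_mkvinfo_result lines = parse_mkvinfo_result_alt lines
  unfold parse_mkvinfo_result parse_mkvinfo_result_alt
  rw [pvAltSkip_eq]
  rcases hd : lines.dropWhile (fun l => !(l == "|+ Tracks")) with _ | ⟨h, rest⟩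
  · simp [PySem.List.slice_from_one, pvGroupByTrack]
  · show _ = pvFinalize (rest.foldl pvAltStep ([], none, none, false))
    simp only [PySem.List.slice_from_one, List.tail_cons]
    rw [pvFoldA]
    have hB : pvFinalize (rest.foldl pvAltStep ([], none, none, false)) =
        [] ++ (pvGroups [] rest).map (fun t => pvEmit (pvOptCodec t) (pvOptLang t)) :=
      pvFoldB rest [] []
    rw [hB]
    rw [show (pvGroupByTrack rest).filterMap (fun kg => if kg.1 then none else some kg.2) =
        pvNonKey (pvGroupByTrack rest) from rfl, (pvGroupBy_spec rest).1]
    simp [pvTrackInfo_eq]
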